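-- pv_equiv track=rewrite | github.com/opletelia/Mathtermind | src/services/math_tools_service.py | _has_invalid_operators
-- ===== SOURCE A (Python) =====
-- def _has_invalid_operators(expression: str) -> bool:
--     """
--     Check if the expression has invalid operator usage.
--
--     Args:
--         expression: The expression to check
--
--     Returns:
--         True if there are invalid operators, False otherwise
--     """
--     # Check for consecutive operators (++, --, +*, etc.)
--     for i in range(len(expression) - 1):
--         if expression[i] in "+-*/^" and expression[i + 1] in "+-*/^":
--             # Allow for double asterisk (**) for exponentiation
--             if not (expression[i] == "*" and expression[i + 1] == "*"):
--                 return True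
--
--     # Check for operators at the beginning (except + and -)
--     if expression and expression[0] in "*/^":
--         return True
--
--     # Check for operators at the end
--     if expression and expression[-1] in "+-*/^":
--         return True
--
--     return False
-- ===== SOURCE B (Python) =====
-- def _has_invalid_operators(expression: str) -> bool:
--     """Alternative implementation: index the operator occurrences once, then
--     judge validity from the operator-position list instead of rescanning chars."""
--     ops = "+-*/^"
--     pos = [(i, c) for i, c in enumerate(expression) if c in ops]
--     # Two operators are adjacent iff consecutive entries of pos have indices i, i+1.
--     for (i, a), (j, b) in zip(pos, pos[1:]):
--         if j == i + 1 and (a, b) != ("*", "*"):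
--             return True
--     if not pos:
--         return False
--     first_i, first_c = pos[0]
--     if first_i == 0 and first_c in "*/^":
--         return True
--     last_i, _ = pos[-1]
--     return last_i == len(expression) - 1
-- ===== Notes on version B (the rewrite author's own statement) =====
-- stated objective: alternative
-- what changed: B builds the list of operator occurrences (index, char) once with enumerate and judges validity from that position list (consecutive indices, first entry, last entry) instead of A's per-character scan with index lookups.
import Mathlib
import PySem

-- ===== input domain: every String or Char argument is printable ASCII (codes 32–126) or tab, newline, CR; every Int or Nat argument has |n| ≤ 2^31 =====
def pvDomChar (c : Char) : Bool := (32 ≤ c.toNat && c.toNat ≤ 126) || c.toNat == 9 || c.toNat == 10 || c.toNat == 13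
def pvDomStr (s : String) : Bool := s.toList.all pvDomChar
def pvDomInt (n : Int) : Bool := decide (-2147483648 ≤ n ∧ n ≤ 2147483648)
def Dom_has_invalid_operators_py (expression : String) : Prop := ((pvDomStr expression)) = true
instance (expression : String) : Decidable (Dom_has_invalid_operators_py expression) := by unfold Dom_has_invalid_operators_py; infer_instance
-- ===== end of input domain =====

-- B re-implements A by indexing the operator occurrences once and judging from that
-- position list; same return value, no speed claim (objective: alternative).

-- the character class "+-*/^" and "*/^" used by both Pythons
def pvOps : List Char := ['+', '-', '*', '/', '^']
def pvOpsLead : List Char := ['*', '/', '^']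

-- ===== PORT A =====
def has_invalid_operators_py (expression : String) : Bool :=
  let cs := expression.toList
  let n : Int := cs.length
  -- for i in range(len(expression) - 1): early 'return True' on a pure condition = any
  if (PySem.List.pyRange 0 (n - 1) 1).any (fun i =>
        pvOps.contains (PySem.List.pyGetD cs i ' ') &&
        pvOps.contains (PySem.List.pyGetD cs (i + 1) ' ') &&
        !(PySem.List.pyGetD cs i ' ' == '*' && PySem.List.pyGetD cs (i + 1) ' ' == '*'))
  then true
  else if !cs.isEmpty && pvOpsLead.contains (PySem.List.pyGetD cs 0 ' ') then true
  else if !cs.isEmpty && pvOps.contains (PySem.List.pyGetD cs (-1) ' ') then true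
  else false

-- ===== PORT B =====
def has_invalid_operators_py_alt (expression : String) : Bool :=
  let cs := expression.toList
  -- pos = [(i, c) for i, c in enumerate(expression) if c in ops]
  let pos := (PySem.List.enumerate cs 0).filter (fun q => pvOps.contains q.2)
  -- for (i, a), (j, b) in zip(pos, pos[1:]): early 'return True' = any  (pos[1:] = tail)
  if (pos.zip pos.tail).any (fun q =>
        q.2.1 == q.1.1 + 1 && !(q.1.2 == '*' && q.2.2 == '*'))
  then true
  else
    match pos with
    | [] => false                      -- if not pos: return False
    | (first_i, first_c) :: _ =>
      if first_i == 0 && pvOpsLead.contains first_c then true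
      else
        -- last_i, _ = pos[-1]  (pos ≠ [] here, so getLastD's default is never used)
        (pos.getLastD (0, ' ')).1 == (cs.length : Int) - 1

-- ===== PRECONDITION & SPEC =====
def Spec_has_invalid_operators_py (expression : String) (out : Bool) : Prop := out = has_invalid_operators_py_alt expression
instance (expression : String) (out : Bool) : Decidable (Spec_has_invalid_operators_py expression out) := by unfold Spec_has_invalid_operators_py; infer_instance

-- ===== CLAIM (what is proved, stated in full; the proofs are below) =====
def Claim_equal_has_invalid_operators_py : Prop := ∀ (expression : String), Dom_has_invalid_operators_py expression → Spec_has_invalid_operators_py expression (has_invalid_operators_py expression)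

-- ===== LEMMAS AND PROOFS =====

-- canonical "some adjacent pair of operators other than **" predicate
def pvAdjBad : List Char → Bool
  | a :: b :: r =>
      (pvOps.contains a && pvOps.contains b && !(a == '*' && b == '*')) || pvAdjBad (b :: r)
  | _ => false

theorem pvAdjBad_cons_notop {a : Char} {t : List Char}
    (h : pvOps.contains a = false) : pvAdjBad (a :: t) = pvAdjBad t := by
  cases t with
  | nil => simp [pvAdjBad]
  | cons b r =>
    simp only [pvAdjBad]
    rw [show pvOps.contains a = false from h]
    simp

theorem pvLead_sub {c : Char} (h : pvOps.contains c = false) :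
    pvOpsLead.contains c = false := by
  simp only [pvOps, pvOpsLead, List.contains_cons, List.contains_nil,
    Bool.or_eq_false_iff] at *
  exact ⟨h.2.2.1, h.2.2.2⟩

-- the adjacent-pair scan over Nat indices computes pvAdjBad
theorem pvAdj_nat (cs : List Char) :
    ((List.range (cs.length - 1)).any (fun k =>
        pvOps.contains (cs.getD k ' ') &&
        pvOps.contains (cs.getD (k + 1) ' ') &&
        !(cs.getD k ' ' == '*' && cs.getD (k + 1) ' ' == '*'))) = pvAdjBad cs := by
  induction cs with
  | nil => simp [pvAdjBad]
  | cons a t ih =>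
    cases t with
    | nil => simp [pvAdjBad]
    | cons b r =>
      simp only [List.length_cons, Nat.add_sub_cancel, List.range_succ_eq_map,
        List.any_cons, List.any_map, Function.comp_def, List.getD_cons_succ,
        List.getD_cons_zero] at ih ⊢
      rw [ih]
      rfl

-- A's index loop computes pvAdjBad
theorem pvA_pair (cs : List Char) :
    ((PySem.List.pyRange 0 ((cs.length : Int) - 1) 1).any (fun i =>
        pvOps.contains (PySem.List.pyGetD cs i ' ') &&
        pvOps.contains (PySem.List.pyGetD cs (i + 1) ' ') &&
        !(PySem.List.pyGetD cs i ' ' == '*' && PySem.List.pyGetD cs (i + 1) ' ' == '*')))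
      = pvAdjBad cs := by
  rw [PySem.List.pyRange_one,
    show (((cs.length : Int) - 1 - 0).toNat) = cs.length - 1 from by omega,
    List.any_map, ← pvAdj_nat cs]
  refine List.any_congr rfl fun k => ?_
  simp only [Function.comp_def]
  rw [show (0 : Int) + (k : Int) = ((k : Nat) : Int) from by ring,
    PySem.List.pyGetD_natCast]
  rw [show ((k : Nat) : Int) + 1 = ((k + 1 : Nat) : Int) from by push_cast; ring,
    PySem.List.pyGetD_natCast]

-- indices in a filtered enumeration are ≥ the start
theorem pvEnum_ge {p : Int × Char → Bool} {cs : List Char} {s : Int} {q : Int × Char}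
    (h : q ∈ (PySem.List.enumerate cs s).filter p) : s ≤ q.1 := by
  have hm := (List.mem_filter.mp h).1
  rcases (PySem.List.mem_enumerate_iff _ _ _).mp hm with ⟨k, hk, rfl⟩
  show s ≤ s + (k : Int)
  omega

-- unfolding the zip-with-tail "adjacent pairs" scan at a cons
theorem pvPairAny_cons (x : Int × Char) (L : List (Int × Char))
    (p : (Int × Char) × (Int × Char) → Bool) :
    ((x :: L).zip (x :: L).tail).any p
      = ((match L with | [] => false | y :: _ => p (x, y)) || (L.zip L.tail).any p) := by
  cases L <;> simp

-- B's pair loop over the position list computes pvAdjBad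
theorem pvB_pair (cs : List Char) (s : Int) :
    ((((PySem.List.enumerate cs s).filter (fun q => pvOps.contains q.2)).zip
        ((PySem.List.enumerate cs s).filter (fun q => pvOps.contains q.2)).tail).any (fun q =>
          q.2.1 == q.1.1 + 1 && !(q.1.2 == '*' && q.2.2 == '*')))
      = pvAdjBad cs := by
  induction cs generalizing s with
  | nil => simp [PySem.List.enumerate_nil, pvAdjBad]
  | cons a t ih =>
    rw [PySem.List.enumerate_cons, List.filter_cons]
    by_cases ha : pvOps.contains a = true
    · rw [if_pos ha]
      cases t with
      | nil => simp [PySem.List.enumerate_nil, pvAdjBad]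
      | cons b r =>
        rw [pvPairAny_cons, ih (s + 1)]
        by_cases hb : pvOps.contains b = true
        · have hF : (PySem.List.enumerate (b :: r) (s + 1)).filter (fun q => pvOps.contains q.2)
              = (s + 1, b) :: (PySem.List.enumerate r (s + 2)).filter (fun q => pvOps.contains q.2) := by
            rw [PySem.List.enumerate_cons, List.filter_cons, if_pos hb]
            ring_nf
          rw [hF]
          show ((s + 1 == s + 1 && !(a == '*' && b == '*')) || pvAdjBad (b :: r))
              = pvAdjBad (a :: b :: r)
          rw [show pvAdjBad (a :: b :: r)
                = ((pvOps.contains a && pvOps.contains b && !(a == '*' && b == '*'))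
                   || pvAdjBad (b :: r)) from rfl, ha, hb]
          simp
        · have hb' : pvOps.contains b = false := Bool.eq_false_iff.mpr hb
          have hF : (PySem.List.enumerate (b :: r) (s + 1)).filter (fun q => pvOps.contains q.2)
              = (PySem.List.enumerate r (s + 2)).filter (fun q => pvOps.contains q.2) := by
            rw [PySem.List.enumerate_cons, List.filter_cons, if_neg hb]
            ring_nf
          rw [hF]
          have hRHS : pvAdjBad (a :: b :: r) = pvAdjBad (b :: r) := by
            rw [show pvAdjBad (a :: b :: r)
                  = ((pvOps.contains a && pvOps.contains b && !(a == '*' && b == '*'))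
                     || pvAdjBad (b :: r)) from rfl, hb']
            simp
          rw [hRHS]
          rcases hE : (PySem.List.enumerate r (s + 2)).filter (fun q => pvOps.contains q.2) with
            _ | ⟨⟨jj, c⟩, Fr⟩
          · rw [hE]
            simp
          · rw [hE]
            have hj : s + 2 ≤ jj := by
              have hm : ((jj, c) : Int × Char)
                  ∈ (PySem.List.enumerate r (s + 2)).filter (fun q => pvOps.contains q.2) := by
                rw [hE]; exact List.mem_cons_self
              exact pvEnum_ge hm
            have : ((jj : Int) == (s, a).1 + 1) = false := by
              simp only [beq_eq_false_iff_ne, ne_eq]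
              omega
            show ((jj == s + 1 && !(a == '*' && c == '*')) || _) = _
            rw [this]
            simp
    · have ha' : pvOps.contains a = false := Bool.eq_false_iff.mpr ha
      rw [if_neg ha]
      rw [ih (s + 1), pvAdjBad_cons_notop ha']

-- pos's snd-projection is the plain filter of cs
theorem pvPos_snd (cs : List Char) (s : Int) :
    ((PySem.List.enumerate cs s).filter (fun q => pvOps.contains q.2)).map (·.2)
      = cs.filter (fun c => pvOps.contains c) := by
  induction cs generalizing s with
  | nil => simp [PySem.List.enumerate_nil]
  | cons a t ih =>
    rw [PySem.List.enumerate_cons]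
    by_cases h : a ∈ pvOps
    · simp only [List.filter_cons]
      rw [show (pvOps.contains a) = true by simpa using h]
      simpa using ih (s + 1)
    · simp only [List.filter_cons]
      rw [show (pvOps.contains a) = false by simpa using h]
      simpa using ih (s + 1)

-- B's first-entry check equals A's leading-character check
theorem pvB_lead (cs : List Char) :
    (match (PySem.List.enumerate cs 0).filter (fun q => pvOps.contains q.2) with
      | [] => false
      | (i, c) :: _ => (i == 0 && pvOpsLead.contains c))
      = (!cs.isEmpty && pvOpsLead.contains (PySem.List.pyGetD cs 0 ' ')) := by
  cases cs with
  | nil => simp [PySem.List.enumerate_nil]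
  | cons a t =>
    rw [PySem.List.enumerate_cons, List.filter_cons]
    by_cases ha : pvOps.contains a = true
    · rw [if_pos ha]
      show ((0 : Int) == 0 && pvOpsLead.contains a) = _
      simp [PySem.List.pyGetD_zero_cons]
    · have ha' : pvOps.contains a = false := Bool.eq_false_iff.mpr ha
      rw [if_neg ha]
      rw [show (!(a :: t).isEmpty && pvOpsLead.contains (PySem.List.pyGetD (a :: t) 0 ' '))
            = false from by
        simp only [PySem.List.pyGetD_zero_cons]
        simp
        simpa using pvLead_sub ha']
      rcases hE : (PySem.List.enumerate t ((0 : Int) + 1)).filter (fun q => pvOps.contains q.2) with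
        _ | ⟨⟨i, c⟩, F⟩
      · rw [hE]
      · rw [hE]
        have hi : (0 : Int) + 1 ≤ i := pvEnum_ge (by rw [hE]; exact List.mem_cons_self)
        show ((i == (0 : Int)) && _) = false
        rw [show (i == (0 : Int)) = false from by
          simp only [beq_eq_false_iff_ne, ne_eq]; omega]
        simp

-- B's last-entry check equals A's trailing-character check
theorem pvB_last (cs : List Char) (s : Int) :
    (match ((PySem.List.enumerate cs s).filter (fun q => pvOps.contains q.2)).getLast? with
      | some q => (q.1 == s + (cs.length : Int) - 1)
      | none => false)
      = (match cs.getLast? with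
         | some c => pvOps.contains c
         | none => false) := by
  induction cs generalizing s with
  | nil => simp [PySem.List.enumerate_nil]
  | cons a t ih =>
    rw [PySem.List.enumerate_cons, List.filter_cons]
    by_cases ha : pvOps.contains a = true
    · rw [if_pos ha]
      cases t with
      | nil =>
        rw [PySem.List.enumerate_nil]
        show ((s == s + ((1 : Nat) : Int) - 1)) = _
        rw [show (s == s + ((1 : Nat) : Int) - 1) = true from by
          simp only [beq_iff_eq]; omega]
        exact ha.symm
      | cons b r =>
        rcases hE : (PySem.List.enumerate (b :: r) (s + 1)).filter (fun q => pvOps.contains q.2)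
          with _ | ⟨q0, F⟩
        · rw [hE]
          show ((s == s + (((b :: r).length + 1 : Nat) : Int) - 1)) = _
          rw [show (s == s + (((b :: r).length + 1 : Nat) : Int) - 1) = false from by
            simp only [beq_eq_false_iff_ne, ne_eq]
            push_cast [List.length_cons]
            omega]
          have hall : ∀ c ∈ b :: r, ¬ pvOps.contains c = true := by
            intro c hc hcontains
            have : ((b :: r).filter (fun c => pvOps.contains c)) = [] := by
              rw [← pvPos_snd (b :: r) (s + 1), hE]
              rfl
            exact (List.filter_eq_nil_iff.mp this) c hc hcontains
          rw [List.getLast?_cons_cons]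
          rcases hL : (b :: r).getLast? with _ | c
          · rfl
          · exact (Bool.eq_false_iff.mpr (hall c (List.mem_of_getLast? hL))).symm
        · rw [hE, List.getLast?_cons_cons, ← hE, List.getLast?_cons_cons]
          rw [show s + (((a :: b :: r).length : Nat) : Int) - 1
                = (s + 1) + ((((b :: r).length : Nat) : Int)) - 1 from by
            push_cast [List.length_cons]; ring]
          exact ih (s + 1)
    · have ha' : pvOps.contains a = false := Bool.eq_false_iff.mpr ha
      rw [if_neg ha]
      cases t with
      | nil =>
        rw [PySem.List.enumerate_nil]
        show false = _
        simp
        simpa using ha'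
      | cons b r =>
        rw [List.getLast?_cons_cons]
        rw [show s + (((a :: b :: r).length : Int)) - 1
              = (s + 1) + (((b :: r).length : Int)) - 1 from by
          push_cast [List.length_cons]; ring]
        exact ih (s + 1)

-- A's trailing-character check in getLast? form
theorem pvA_last (cs : List Char) :
    (!cs.isEmpty && pvOps.contains (PySem.List.pyGetD cs (-1) ' '))
      = (match cs.getLast? with
         | some c => pvOps.contains c
         | none => false) := by
  cases cs with
  | nil => simp
  | cons a t =>
    have hne : (a :: t) ≠ [] := by simp
    rw [PySem.List.pyGetD_neg_one (a :: t) ' ' hne,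
      List.getLast?_eq_some_getLast hne]
    simp

-- ===== VERDICT (by name: the statement is the Claim_ definition above) =====
theorem has_invalid_operators_py_spec : Claim_equal_has_invalid_operators_py := by
  intro expression _
  show has_invalid_operators_py expression = has_invalid_operators_py_alt expression
  unfold has_invalid_operators_py has_invalid_operators_py_alt
  simp only []
  rw [pvA_pair expression.toList, pvB_pair expression.toList 0]
  cases hAdj : pvAdjBad expression.toList with
  | true => simp
  | false =>
    simp only [Bool.false_eq_true, if_false]
    rcases hP : (PySem.List.enumerate expression.toList 0).filter
        (fun q => pvOps.contains q.2) with _ | ⟨⟨i, c⟩, rest⟩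
    · have hLead := pvB_lead expression.toList
      rw [hP] at hLead
      have hLead' : (!expression.toList.isEmpty
          && pvOpsLead.contains (PySem.List.pyGetD expression.toList 0 ' ')) = false :=
        hLead.symm
      have hLast := pvB_last expression.toList 0
      rw [hP] at hLast
      rw [← pvA_last expression.toList] at hLast
      have hLast' : (!expression.toList.isEmpty
          && pvOps.contains (PySem.List.pyGetD expression.toList (-1) ' ')) = false :=
        hLast.symm
      rw [hP, hLead', hLast']
      rfl
    · have hLead := pvB_lead expression.toList
      rw [hP] at hLead
      have hLast := pvB_last expression.toList 0
      rw [← pvA_last expression.toList] at hLast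
      rw [hP] at hLast
      rw [hP]
      cases hL : ((i : Int) == 0 && pvOpsLead.contains c) with
      | true =>
        have hLA : (!expression.toList.isEmpty
            && pvOpsLead.contains (PySem.List.pyGetD expression.toList 0 ' ')) = true :=
          hLead.symm.trans hL
        rw [hLA]
        show _ = (if ((i : Int) == 0 && pvOpsLead.contains c) = true then true
               else (((i, c) :: rest).getLastD (0, ' ')).1 == (expression.toList.length : Int) - 1)
        rw [hL]
        rfl
      | false =>
        have hLA : (!expression.toList.isEmpty
            && pvOpsLead.contains (PySem.List.pyGetD expression.toList 0 ' ')) = false :=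
          hLead.symm.trans hL
        rw [hLA]
        have hgl : ((i, c) :: rest).getLast? = some (((i, c) :: rest).getLastD (0, ' ')) := by
          rw [List.getLastD_eq_getLast?, List.getLast?_eq_some_getLast (by simp)]
          rfl
        rw [hgl] at hLast
        rw [show (0 : Int) + (expression.toList.length : Int) - 1
              = (expression.toList.length : Int) - 1 from by ring] at hLast
        have hLB : ((((i, c) :: rest).getLastD (0, ' ')).1 == (expression.toList.length : Int) - 1)
            = (!expression.toList.isEmpty
               && pvOps.contains (PySem.List.pyGetD expression.toList (-1) ' ')) := hLast
        show (if (!expression.toList.isEmpty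
               && pvOps.contains (PySem.List.pyGetD expression.toList (-1) ' ')) = true
              then true else false)
            = (if ((i : Int) == 0 && pvOpsLead.contains c) = true then true
               else (((i, c) :: rest).getLastD (0, ' ')).1 == (expression.toList.length : Int) - 1)
        rw [hL, hLB]
        cases (!expression.toList.isEmpty
            && pvOps.contains (PySem.List.pyGetD expression.toList (-1) ' ')) <;> simp
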